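-- pv_equiv track=rewrite | github.com/ldct/cp | codeforces/646/A/A.py | ans2
-- ===== SOURCE A (Python) =====
-- def ans(A, x):
--
--     pos_odd = []
--     pos_even = []
--     ret = []
--
--     for i, e in enumerate(A):
--         if e % 2 == 1:
--             pos_odd += [i]
--         else:
--             pos_even += [i]
--
--     if len(pos_odd) == 0:
--         return None
--
--     # grab an odd number
--     ret += [pos_odd[0]]
--     pos_odd = pos_odd[1:]
--     x -= 1
--
--     assert(len(pos_even) >= 0)
--     assert(len(pos_odd) >= 0)
--
--     # now select x numbers with an even sum
--
--     # greedily use all pairs of odd numbers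
--     if len(pos_odd) % 2 == 1:
--         pos_odd = pos_odd[1:]
--
--     while x > 1 and len(pos_odd):
--         x -= 2
--         ret += pos_odd[0:2]
--         pos_odd = pos_odd[2:]
--
--     assert(x >= 0)
--
--     while x > 0 and len(pos_even):
--         x -= 1
--         ret += pos_even[0:1]
--         pos_even = pos_even[1:]
--
--     if x == 0:
--         return ret
--
--     return None
--
-- def ans2(A, x):
--     ret = ans(A, x)
--     if ret is None:
--         return "No"
--
--     if ret == "Yes":
--         return "Yes"
--
--     assert(len(ret) == x)
--     sum = 0
--     for i in ret:
--         sum += A[i]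
--     assert(sum % 2 == 1)
--
--
--     return "Yes"
-- ===== SOURCE B (Python) =====
-- def ans2(A, x):
--     O = 0
--     for e in A:
--         if e % 2 == 1:
--             O += 1
--     E = len(A) - O
--     lo = max(1, x - E)
--     hi = min(O, x)
--     return "Yes" if lo <= hi and (lo % 2 == 1 or lo < hi) else "No"
-- ===== Notes on version B (the rewrite author's own statement) =====
-- stated objective: simpler
-- what changed: B replaces A's greedy construction of index lists (split indices by parity, grab one odd, pair up remaining odds via repeated list slicing, pad with evens) by a one-pass odd/even count and a closed-form feasibility test: a selection exists iff the interval [max(1,x-E), min(O,x)] is non-empty and contains an odd integer.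
import Mathlib
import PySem

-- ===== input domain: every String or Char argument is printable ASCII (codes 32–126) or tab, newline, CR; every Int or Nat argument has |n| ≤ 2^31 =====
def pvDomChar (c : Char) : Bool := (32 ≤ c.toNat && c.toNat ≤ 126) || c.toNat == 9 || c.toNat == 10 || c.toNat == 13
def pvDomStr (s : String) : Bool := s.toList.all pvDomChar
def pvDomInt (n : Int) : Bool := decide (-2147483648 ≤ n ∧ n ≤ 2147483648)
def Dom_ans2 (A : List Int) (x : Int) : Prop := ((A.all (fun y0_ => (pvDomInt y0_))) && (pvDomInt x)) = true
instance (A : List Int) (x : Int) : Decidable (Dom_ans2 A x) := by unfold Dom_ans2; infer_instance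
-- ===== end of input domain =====

-- B replaces A's greedy index-list construction by a one-pass odd/even count
-- and a closed-form interval feasibility test (objective: simpler).
-- A raises AssertionError when x ≤ 0 and some element is odd; those inputs are outside Pre_.

-- ===== PORT A =====
-- the enumerate loop of `ans`: builds pos_odd and pos_even (index lists) in order
def ansSplit (A : List Int) : List Int × List Int :=
  ((PySem.List.enumerate A).foldl
    (fun (s : List Int × List Int) (ie : Int × Int) =>
      if PySem.Int.mod ie.2 2 = 1 then (s.1 ++ [ie.1], s.2) else (s.1, s.2 ++ [ie.1]))
    ([], []))

-- `while x > 1 and len(pos_odd): x -= 2; ret += pos_odd[0:2]; pos_odd = pos_odd[2:]`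
def ansLoop1 (x : Int) (po ret : List Int) : Int × List Int :=
  if x > 1 ∧ po ≠ [] then ansLoop1 (x - 2) (po.drop 2) (ret ++ po.take 2) else (x, ret)
termination_by po.length
decreasing_by
  rename_i h
  cases po with
  | nil => exact absurd rfl h.2
  | cons a t => simp

-- `while x > 0 and len(pos_even): x -= 1; ret += pos_even[0:1]; pos_even = pos_even[1:]`
def ansLoop2 (x : Int) (pe ret : List Int) : Int × List Int :=
  if x > 0 ∧ pe ≠ [] then ansLoop2 (x - 1) (pe.drop 1) (ret ++ pe.take 1) else (x, ret)
termination_by pe.length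
decreasing_by
  rename_i h
  cases pe with
  | nil => exact absurd rfl h.2
  | cons a t => simp

-- `ans`: none stands both for Python's `return None` and for the AssertionError of
-- `assert(x >= 0)` (which can only fire outside Pre_ans2)
def ansA (A : List Int) (x : Int) : Option (List Int) :=
  let s := ansSplit A
  match s.1 with
  | [] => none
  | i0 :: potail =>
    let ret := [i0]
    let x1 := x - 1
    let po2 := if potail.length % 2 = 1 then potail.drop 1 else potail
    let r1 := ansLoop1 x1 po2 ret
    if r1.1 < 0 then none          -- assert(x >= 0) failing = raise (outside Pre_)
    else
      let r2 := ansLoop2 r1.1 s.2 r1.2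
      if r2.1 = 0 then some r2.2 else none

-- `ans2`: the `ret == "Yes"` branch is dead in Python (a list is never equal to a str),
-- and the two asserts hold on every input inside Pre_ans2 on which `ans` returns a list.
def ans2 (A : List Int) (x : Int) : String :=
  match ansA A x with
  | none => "No"
  | some _ => "Yes"

-- ===== PORT B =====
def ans2_alt (A : List Int) (x : Int) : String :=
  let O : Int := A.foldl (fun c e => if PySem.Int.mod e 2 = 1 then c + 1 else c) 0
  let E : Int := (A.length : Int) - O
  let lo : Int := max 1 (x - E)
  let hi : Int := min O x
  if lo ≤ hi ∧ (PySem.Int.mod lo 2 = 1 ∨ lo < hi) then "Yes" else "No"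

-- ===== PRECONDITION & SPEC =====
-- Pre_ excludes exactly the inputs on which A raises AssertionError
-- (`assert(x >= 0)` in `ans`): x ≤ 0 while the list contains an odd element.
def Pre_ans2 (A : List Int) (x : Int) : Prop :=
  1 ≤ x ∨ ∀ e ∈ A, PySem.Int.mod e 2 ≠ 1
instance (A : List Int) (x : Int) : Decidable (Pre_ans2 A x) := by unfold Pre_ans2; infer_instance

def pvWitness_ans2 : List Int × Int := ([1, 2, 3], 2)

def Spec_ans2 (A : List Int) (x : Int) (out : String) : Prop := out = ans2_alt A x
instance (A : List Int) (x : Int) (out : String) : Decidable (Spec_ans2 A x out) := by unfold Spec_ans2; infer_instance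

-- ===== CLAIM (what is proved, stated in full; the proofs are below) =====
def Claim_equal_ans2 : Prop := ∀ (A : List Int) (x : Int), Dom_ans2 A x → Pre_ans2 A x → Spec_ans2 A x (ans2 A x)

-- ===== LEMMAS AND PROOFS =====

def isOddI (e : Int) : Bool := PySem.Int.mod e 2 = 1

-- mod of a positive literal divisor is emod
lemma pymod2 (a : Int) : PySem.Int.mod a 2 = a % 2 :=
  PySem.Int.mod_eq_emod_of_pos (by norm_num)


-- the enumerate fold only appends; resulting lengths are counts
lemma ansSplit_lengths (A : List Int) :
    (ansSplit A).1.length = A.countP isOddI ∧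
    (ansSplit A).2.length = A.length - A.countP isOddI := by
  have key : ∀ (l : List (Int × Int)) (po pe : List Int),
      (l.foldl (fun (s : List Int × List Int) (ie : Int × Int) =>
        if PySem.Int.mod ie.2 2 = 1 then (s.1 ++ [ie.1], s.2) else (s.1, s.2 ++ [ie.1]))
        (po, pe)).1.length = po.length + l.countP (fun ie => isOddI ie.2) ∧
      (l.foldl (fun (s : List Int × List Int) (ie : Int × Int) =>
        if PySem.Int.mod ie.2 2 = 1 then (s.1 ++ [ie.1], s.2) else (s.1, s.2 ++ [ie.1]))
        (po, pe)).2.length = pe.length + (l.length - l.countP (fun ie => isOddI ie.2)) := by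
    intro l
    induction l with
    | nil => intro po pe; simp
    | cons h t ih =>
      intro po pe
      have hc : t.countP (fun ie => isOddI ie.2) ≤ t.length := List.countP_le_length
      by_cases hodd : PySem.Int.mod h.2 2 = 1
      · have hob : isOddI h.2 = true := by unfold isOddI; exact decide_eq_true hodd
        rw [List.foldl_cons]
        rw [show (if PySem.Int.mod h.2 2 = 1 then (po ++ [h.1], pe) else (po, pe ++ [h.1]))
            = (po ++ [h.1], pe) from if_pos hodd]
        obtain ⟨h1, h2⟩ := ih (po ++ [h.1]) pe
        refine ⟨?_, ?_⟩
        · rw [h1]; simp [List.countP_cons, hob] <;> omega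
        · rw [h2]; simp [List.countP_cons, hob] <;> omega
      · have hob : isOddI h.2 = false := by unfold isOddI; exact decide_eq_false hodd
        rw [List.foldl_cons]
        rw [show (if PySem.Int.mod h.2 2 = 1 then (po ++ [h.1], pe) else (po, pe ++ [h.1]))
            = (po, pe ++ [h.1]) from if_neg hodd]
        obtain ⟨h1, h2⟩ := ih po (pe ++ [h.1])
        refine ⟨?_, ?_⟩
        · rw [h1]; simp [List.countP_cons, hob] <;> omega
        · rw [h2]; simp [List.countP_cons, hob] <;> omega
  have hcount : (PySem.List.enumerate A).countP (fun ie => isOddI ie.2) = A.countP isOddI := by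
    have h1 := List.countP_map (p := isOddI) (f := fun ie : Int × Int => ie.2)
      (l := PySem.List.enumerate A)
    rw [PySem.List.map_snd_enumerate] at h1
    simpa [Function.comp] using h1.symm
  have hlen : (PySem.List.enumerate A).length = A.length := PySem.List.length_enumerate A 0
  have := key (PySem.List.enumerate A) [] []
  unfold ansSplit
  rw [hcount, hlen] at this
  simpa using this

-- B's fold counts the same predicate
lemma altCount (A : List Int) :
    A.foldl (fun c e => if PySem.Int.mod e 2 = 1 then c + 1 else c) 0
      = (A.countP isOddI : Int) := by
  have key : ∀ (l : List Int) (c : Int),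
      l.foldl (fun c e => if PySem.Int.mod e 2 = 1 then c + 1 else c) c
        = c + (l.countP isOddI : Int) := by
    intro l
    induction l with
    | nil => intro c; simp
    | cons h t ih =>
      intro c
      by_cases hodd : PySem.Int.mod h 2 = 1
      · have hob : isOddI h = true := by unfold isOddI; exact decide_eq_true hodd
        rw [List.foldl_cons,
          show (if PySem.Int.mod h 2 = 1 then c + 1 else c) = c + 1 from if_pos hodd, ih]
        simp only [List.countP_cons, hob]
        push_cast; ring
      · have hob : isOddI h = false := by unfold isOddI; exact decide_eq_false hodd
        rw [List.foldl_cons,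
          show (if PySem.Int.mod h 2 = 1 then c + 1 else c) = c from if_neg hodd, ih]
        simp only [List.countP_cons, hob]
        simp
  simpa using key A 0

lemma ansLoop1_fst (x : Int) (po ret : List Int) (hev : po.length % 2 = 0) :
    (ansLoop1 x po ret).1 = if x ≤ 1 then x else max (x - po.length) (x % 2) := by
  revert hev
  induction x, po, ret using ansLoop1.induct with
  | case1 x po ret h ih =>
    intro hev
    rw [ansLoop1, if_pos h]
    cases po with
    | nil => exact absurd rfl h.2
    | cons a t =>
      cases t with
      | nil => simp at hev
      | cons b u =>
        have ihh := ih (by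
          rw [show List.drop 2 (a :: b :: u) = u from rfl]
          simp only [List.length_cons] at hev
          omega)
        rw [show List.drop 2 (a :: b :: u) = u from rfl,
            show List.take 2 (a :: b :: u) = [a, b] from rfl] at ihh
        rw [show List.drop 2 (a :: b :: u) = u from rfl,
            show List.take 2 (a :: b :: u) = [a, b] from rfl]
        rw [ihh]
        simp only [List.length_cons]
        split_ifs <;> push_cast <;> omega
  | case2 x po ret h =>
    intro _
    rw [ansLoop1, if_neg h]
    split_ifs with h1
    · rfl
    · have hpo : po = [] := by
        by_contra hne
        exact h ⟨by omega, hne⟩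
      subst hpo
      simp
      omega

lemma ansLoop2_fst (pe : List Int) : ∀ (x : Int) (ret : List Int),
    (ansLoop2 x pe ret).1 = if x ≤ 0 then x else max (x - pe.length) 0 := by
  induction pe with
  | nil =>
    intro x ret; rw [ansLoop2]
    simp only [ne_eq, not_true_eq_false, and_false, if_false]
    split_ifs <;> simp <;> omega
  | cons a t ih =>
    intro x ret; rw [ansLoop2]
    by_cases hx : x > 0
    · simp only [hx, ne_eq, List.cons_ne_nil, not_false_eq_true, and_true, if_pos,
        List.drop_succ_cons, List.drop_zero]
      rw [ih]
      have hul : (0:Int) ≤ t.length := by positivity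
      simp only [List.length_cons]
      split_ifs <;> push_cast <;> omega
    · simp [hx]

-- the heart: the greedy success condition equals the interval condition
lemma arith (O E x : Int) (hO : 1 ≤ O) (hE : 0 ≤ E) (hx : 1 ≤ x) :
    ((if x - 1 ≤ 1 then x - 1 else max (x - 1 - 2 * ((O - 1) / 2)) ((x - 1) % 2)) ≤ E)
      ↔ (max 1 (x - E) ≤ min O x ∧ ((max 1 (x - E)) % 2 = 1 ∨ max 1 (x - E) < min O x)) := by
  split_ifs <;> omega

theorem ans2_eq (A : List Int) (x : Int) (hpre : Pre_ans2 A x) :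
    ans2 A x = ans2_alt A x := by
  have hsplit := ansSplit_lengths A
  have hcnt := altCount A
  set O : Nat := A.countP isOddI with hOdef
  have hOle : O ≤ A.length := List.countP_le_length
  cases hpo : (ansSplit A).1 with
  | nil =>
    -- no odd element: A returns "No"; B's interval is empty (hi ≤ 0 < 1 ≤ lo)
    have hO0 : O = 0 := by rw [← hsplit.1, hpo]; rfl
    simp only [ans2, ansA, ans2_alt, hpo, hcnt]
    simp only [pymod2]
    split_ifs with h
    · exfalso; omega
    · rfl
  | cons i0 potail =>
    -- at least one odd element; Pre_ gives 1 ≤ x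
    have hO1 : 1 ≤ O := by
      have : (ansSplit A).1.length ≥ 1 := by rw [hpo]; simp
      omega
    have hx1 : 1 ≤ x := by
      rcases hpre with h | h
      · exact h
      · exfalso
        -- O ≥ 1 contradicts "no odd element": countP positive means a witness exists
        have : 0 < A.countP isOddI := by omega
        rw [List.countP_pos_iff] at this
        obtain ⟨e, he, hodd⟩ := this
        exact h e he (by simpa [isOddI] using hodd)
    have hpt : potail.length = O - 1 := by
      have : (ansSplit A).1.length = potail.length + 1 := by rw [hpo]; simp
      omega
    have hEeq : (ansSplit A).2.length = A.length - O := hsplit.2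
    simp only [ans2, ansA, ans2_alt, hpo, hcnt]
    simp only [pymod2]
    -- length of po2 is 2 * ((O-1)/2), an even number
    set po2 := if potail.length % 2 = 1 then potail.drop 1 else potail with hpo2
    have hpo2len : po2.length = 2 * ((O - 1) / 2) := by
      rw [hpo2]; split_ifs with h
      · rw [List.length_drop]; omega
      · omega
    have hpo2ev : po2.length % 2 = 0 := by omega
    rw [ansLoop1_fst (x - 1) po2 [i0] hpo2ev]
    set x1 : Int := if x - 1 ≤ 1 then x - 1 else max (x - 1 - (po2.length : Int)) ((x - 1) % 2)
      with hx1def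
    have hX : x1 = if x - 1 ≤ 1 then x - 1
        else max (x - 1 - 2 * (((O : Int) - 1) / 2)) ((x - 1) % 2) := by
      rw [hx1def, hpo2len]
      have hcast : ((2 * ((O - 1) / 2) : Nat) : Int) = 2 * (((O : Int) - 1) / 2) := by omega
      rw [hcast]
    have hx1nn : 0 ≤ x1 := by
      rw [hx1def]; split_ifs <;> omega
    rw [if_neg (by omega)]
    rw [ansLoop2_fst]
    have hE' : ((ansSplit A).2.length : Int) = (A.length : Int) - (O : Int) := by
      rw [hEeq]; push_cast; omega
    have harith := arith (O : Int) ((A.length : Int) - (O : Int)) x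
      (by exact_mod_cast hO1) (by push_cast; omega) hx1
    -- both if-conditions are equivalent
    have hiff : ((if x1 ≤ 0 then x1 else max (x1 - ((ansSplit A).2.length : Int)) 0) = 0)
        ↔ (max 1 (x - ((A.length : Int) - (O : Int))) ≤ min (O : Int) x ∧
            ((max 1 (x - ((A.length : Int) - (O : Int)))) % 2 = 1 ∨
              max 1 (x - ((A.length : Int) - (O : Int))) < min (O : Int) x)) := by
      rw [← harith, ← hX, hE']
      split_ifs <;> omega
    by_cases hP : (if x1 ≤ 0 then x1 else max (x1 - ((ansSplit A).2.length : Int)) 0) = 0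
    · rw [if_pos hP, if_pos (hiff.mp hP)]
    · rw [if_neg hP, if_neg (fun hc => hP (hiff.mpr hc))]

-- ===== VERDICT (by name: the statement is the Claim_ definition above) =====
theorem ans2_spec : Claim_equal_ans2 := by
  intro A x _ hpre
  unfold Spec_ans2
  exact ans2_eq A x hpre
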